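-- pv_equiv track=rewrite | github.com/anssilehtela/aoc23 | test_9.py | create_complete
-- ===== SOURCE A (Python) =====
-- def create_complete(seq):
--     complete = [seq]
--     x = 0
--     while True:
--         new_list = []
--         complete[x].reverse()
--         for i in range(len(complete[x]) - 1):
--             new_list.append(complete[x][i] - complete[x][i + 1])
--         complete[x].reverse()
--         new_list.reverse()
--         complete.append(new_list)
--         if all(v == 0 for v in new_list):
--             break
--         x += 1
--     complete.reverse()
--     return complete
-- ===== SOURCE B (Python) =====
-- def create_complete(seq):
--     diffs = [seq[i + 1] - seq[i] for i in range(len(seq) - 1)]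
--     if all(v == 0 for v in diffs):
--         return [diffs, seq]
--     return create_complete(diffs) + [seq]
-- ===== Notes on version B (the rewrite author's own statement) =====
-- stated objective: simpler
-- what changed: Replaces A's in-place while-loop that grows a triangle list with reverse/reverse index tricks and a final list reversal by a short recursion on forward difference sequences that builds the result back-to-front directly.
import Mathlib
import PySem

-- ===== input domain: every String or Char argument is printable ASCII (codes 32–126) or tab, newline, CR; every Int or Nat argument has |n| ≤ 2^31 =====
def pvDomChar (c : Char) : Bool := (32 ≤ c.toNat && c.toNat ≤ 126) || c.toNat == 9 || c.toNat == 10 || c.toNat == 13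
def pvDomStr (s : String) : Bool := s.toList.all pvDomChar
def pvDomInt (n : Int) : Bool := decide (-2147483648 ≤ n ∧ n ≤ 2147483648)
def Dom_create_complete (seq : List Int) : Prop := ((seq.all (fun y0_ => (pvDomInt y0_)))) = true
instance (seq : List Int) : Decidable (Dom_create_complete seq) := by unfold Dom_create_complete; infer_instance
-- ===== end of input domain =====

-- B replaces A's mutating while-loop over a growing triangle list (with its reverse/reverse
-- index trick and final list reversal) by a direct recursion on forward difference sequences;
-- same return value (all-zeros level first, original sequence last). Objective: simpler.

-- ===== PORT A =====
-- One iteration of A's while-loop: `cur` is complete[x] (the most recently appended level),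
-- `acc` is the `complete` list built so far (in append order). The loop indices are always
-- in range, so `getD 0` is exact (the default is never hit).
def create_complete_loop (cur : List Int) (acc : List (List Int)) : List (List Int) :=
  let r := cur.reverse
  let new := (List.range (r.length - 1)).map (fun i => (r[i]?.getD 0) - (r[i+1]?.getD 0))
  let newl := new.reverse
  let acc' := acc ++ [newl]
  if newl.all (fun v => v == 0) then acc'.reverse
  else create_complete_loop newl acc'
termination_by cur.length
decreasing_by
  rename_i h
  simp only [newl, new, r, List.all_eq_true, not_forall] at h
  obtain ⟨x, hx, -⟩ := h
  have hne := List.ne_nil_of_mem hx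
  have hpos := List.length_pos_of_ne_nil hne
  simp only [List.length_reverse, List.length_map, List.length_range, List.length_unattach, List.length_attach] at hpos ⊢
  omega

def create_complete (seq : List Int) : List (List Int) :=
  create_complete_loop seq [seq]

-- ===== PORT B =====
def create_complete_alt (seq : List Int) : List (List Int) :=
  let diffs := (List.range (seq.length - 1)).map (fun i => (seq[i+1]?.getD 0) - (seq[i]?.getD 0))
  if diffs.all (fun v => v == 0) then [diffs, seq]
  else create_complete_alt diffs ++ [seq]
termination_by seq.length
decreasing_by
  rename_i h
  simp only [diffs, List.all_eq_true, not_forall] at h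
  obtain ⟨x, hx, -⟩ := h
  have hne := List.ne_nil_of_mem hx
  have hpos := List.length_pos_of_ne_nil hne
  simp only [List.length_map, List.length_range] at hpos ⊢
  omega

-- ===== PRECONDITION & SPEC =====
def Spec_create_complete (seq : List Int) (out : List (List Int)) : Prop := out = create_complete_alt seq
instance (seq : List Int) (out : List (List Int)) : Decidable (Spec_create_complete seq out) := by unfold Spec_create_complete; infer_instance

-- ===== CLAIM (what is proved, stated in full; the proofs are below) =====
def Claim_equal_create_complete : Prop := ∀ (seq : List Int), Dom_create_complete seq → Spec_create_complete seq (create_complete seq)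

-- ===== LEMMAS AND PROOFS =====

-- A's reversed backward differences of the reversed list equal B's forward differences.
theorem rev_diff_eq (cur : List Int) :
    ((List.range (cur.reverse.length - 1)).map
      (fun i => (cur.reverse[i]?.getD 0) - (cur.reverse[i+1]?.getD 0))).reverse
    = (List.range (cur.length - 1)).map (fun i => (cur[i+1]?.getD 0) - (cur[i]?.getD 0)) := by
  apply List.ext_getElem
  · simp
  · intro j h1 h2
    have hj : j < cur.length - 1 := by simpa using h2
    simp only [List.getElem_reverse, List.getElem_map, List.getElem_range,
      List.length_reverse, List.length_map, List.length_range]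
    rw [List.getElem?_reverse (by omega), List.getElem?_reverse (by omega)]
    have e1 : cur.length - 1 - (cur.length - 1 - 1 - j) = j + 1 := by omega
    have e2 : cur.length - 1 - (cur.length - 1 - 1 - j + 1) = j := by omega
    rw [e1, e2]

-- Every result of B ends with its argument.
theorem alt_last (seq : List Int) : ∃ p, create_complete_alt seq = p ++ [seq] := by
  rw [create_complete_alt]
  split
  · exact ⟨[_], rfl⟩
  · exact ⟨_, rfl⟩

theorem loop_eq (n : Nat) : ∀ (cur : List Int) (acc : List (List Int)), cur.length ≤ n →
    create_complete_loop cur acc = (create_complete_alt cur).dropLast ++ acc.reverse := by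
  induction n with
  | zero =>
    intro cur acc hlen
    have : cur = [] := List.eq_nil_of_length_eq_zero (by omega)
    subst this
    rw [create_complete_loop.eq_def, create_complete_alt.eq_def]
    simp
  | succ n ih =>
    intro cur acc hlen
    rw [create_complete_loop.eq_def, create_complete_alt.eq_def]
    simp only [rev_diff_eq]
    by_cases hall :
        ((List.range (cur.length - 1)).map
          (fun i => (cur[i+1]?.getD 0) - (cur[i]?.getD 0))).all (fun v => v == 0)
    · simp [hall]
    · simp only [hall, if_neg, Bool.false_eq_true, not_false_iff]
      rw [ih _ _ (by simp; omega)]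
      obtain ⟨p, hp⟩ := alt_last ((List.range (cur.length - 1)).map
        (fun i => (cur[i+1]?.getD 0) - (cur[i]?.getD 0)))
      rw [hp]
      simp

-- ===== VERDICT (by name: the statement is the Claim_ definition above) =====
theorem create_complete_spec : Claim_equal_create_complete := by
  intro seq _
  show create_complete seq = create_complete_alt seq
  rw [create_complete, loop_eq seq.length _ _ le_rfl]
  obtain ⟨p, hp⟩ := alt_last seq
  rw [hp]
  simp
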